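-- pv_equiv track=rewrite | github.com/erza-b/course_assignments | Iterators and Generators/task2.py | in_range
-- ===== SOURCE A (Python) =====
-- def in_range(start,end,step=1):
--     if not all(isinstance(arg,int)for arg in (start,end,step)):
--         raise TypeError("Arguments must be integers")
--     if step==0:
--         raise ValueError("Step cannot be zero")
--     result=[]
--     current=start
--
--     while(step>0 and current <end) or(step<0 and current>end):
--         result.append(current)
--         current+=step
--
--     return result
-- ===== SOURCE B (Python) =====
-- def in_range(start, end, step=1):
--     if not all(isinstance(arg, int) for arg in (start, end, step)):
--         raise TypeError("Arguments must be integers")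
--     if step == 0:
--         raise ValueError("Step cannot be zero")
--     return list(range(start, end, step))
-- ===== Notes on version B (the rewrite author's own statement) =====
-- stated objective: idiomatic
-- what changed: The manual while-loop that tracks a `current` variable and appends one element at a time is replaced by a single delegation to the builtin range object, list(range(start, end, step)); both validation guards are kept.
import Mathlib
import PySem

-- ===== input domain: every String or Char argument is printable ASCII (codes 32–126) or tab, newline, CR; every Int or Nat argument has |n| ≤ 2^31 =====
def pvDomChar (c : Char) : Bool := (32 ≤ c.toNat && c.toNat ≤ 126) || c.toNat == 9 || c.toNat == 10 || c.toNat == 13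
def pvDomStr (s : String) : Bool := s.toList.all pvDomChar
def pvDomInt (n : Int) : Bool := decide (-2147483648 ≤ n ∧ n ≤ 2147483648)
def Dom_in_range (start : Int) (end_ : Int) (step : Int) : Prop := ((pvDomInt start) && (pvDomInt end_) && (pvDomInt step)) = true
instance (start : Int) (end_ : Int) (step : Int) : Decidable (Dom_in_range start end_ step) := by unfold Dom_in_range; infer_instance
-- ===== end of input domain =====

-- B replaces A's manual while/append loop by a single delegation to the builtin
-- range object (list(range(start, end, step))); both validation guards are kept (idiomatic).


-- ===== PORT A =====
-- the while-loop of A: while (step>0 and current<end) or (step<0 and current>end): append current; current += step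
def inRangeLoopA (end_ step current : Int) : List Int :=
  if (0 < step ∧ current < end_) ∨ (step < 0 ∧ end_ < current) then
    current :: inRangeLoopA end_ step (current + step)
  else []
termination_by (if 0 < step then end_ - current else current - end_).toNat
decreasing_by
  rename_i h
  rcases h with ⟨h1, h2⟩ | ⟨h1, h2⟩ <;> split <;> omega

-- A raises ValueError on step == 0 (excluded by Pre_); the port returns [] there.
def in_range (start : Int) (end_ : Int) (step : Int) : List Int :=
  if step = 0 then [] else inRangeLoopA end_ step start

-- ===== PORT B =====
-- A raises ValueError on step == 0 (excluded by Pre_); the port returns [] there.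
def in_range_alt (start : Int) (end_ : Int) (step : Int) : List Int :=
  if step = 0 then [] else PySem.List.pyRange start end_ step

-- ===== PRECONDITION & SPEC =====
-- Pre_ excludes exactly step = 0, on which A raises ValueError (and B does too).
def Pre_in_range (start : Int) (end_ : Int) (step : Int) : Prop := step ≠ 0
instance (start : Int) (end_ : Int) (step : Int) : Decidable (Pre_in_range start end_ step) := by unfold Pre_in_range; infer_instance
def pvWitness_in_range : Int × Int × Int := (1, 7, 2)

def Spec_in_range (start : Int) (end_ : Int) (step : Int) (out : List Int) : Prop := out = in_range_alt start end_ step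
instance (start : Int) (end_ : Int) (step : Int) (out : List Int) : Decidable (Spec_in_range start end_ step out) := by unfold Spec_in_range; infer_instance

-- ===== CLAIM (what is proved, stated in full; the proofs are below) =====
def Claim_equal_in_range : Prop := ∀ (start : Int) (end_ : Int) (step : Int), Dom_in_range start end_ step → Pre_in_range start end_ step → Spec_in_range start end_ step (in_range start end_ step)

-- ===== LEMMAS AND PROOFS =====

-- count of range(a,b,s) for 0 < s, written through Int ediv (which is floor-div for s > 0)
theorem pyRange_pos_nil (a b s : Int) (hs : 0 < s) (h : b ≤ a) :
    PySem.List.pyRange a b s = [] := by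
  rw [PySem.List.pyRange_of_pos a b hs]
  simp [show ¬ a < b by omega]

theorem pyRange_neg_nil (a b s : Int) (hs : s < 0) (h : a ≤ b) :
    PySem.List.pyRange a b s = [] := by
  unfold PySem.List.pyRange
  simp only [show ¬ s = 0 by omega, if_false, show ¬ 0 < s by omega, show ¬ b < a by omega]
  simp

theorem pyRange_pos_cons (a b s : Int) (hs : 0 < s) (h : a < b) :
    PySem.List.pyRange a b s = a :: PySem.List.pyRange (a + s) b s := by
  rw [PySem.List.pyRange_of_pos a b hs, PySem.List.pyRange_of_pos (a + s) b hs]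
  have key : b - a + s - 1 = (b - a - 1) + 1 * s := by ring
  have hdiv : (b - a + s - 1) / s = (b - a - 1) / s + 1 := by
    rw [key, Int.add_mul_ediv_right _ _ (by omega : s ≠ 0)]
  have hq0 : 0 ≤ (b - a - 1) / s := Int.ediv_nonneg (by omega) (by omega)
  have hcount2 : (if a + s < b then ((b - (a + s) + s - 1) / s).toNat else 0)
      = ((b - a - 1) / s).toNat := by
    split
    · congr 1; ring_nf
    · have : (b - a - 1) / s = 0 := Int.ediv_eq_zero_of_lt (by omega) (by omega)
      omega
  rw [hcount2, if_pos h, hdiv]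
  have : ((b - a - 1) / s + 1).toNat = ((b - a - 1) / s).toNat + 1 := by omega
  rw [this, List.range_succ_eq_map, List.map_cons, List.map_map]
  congr 1
  · simp
  · apply List.map_congr_left
    intro k _
    simp [Function.comp]
    ring

theorem pyRange_neg_cons (a b s : Int) (hs : s < 0) (h : b < a) :
    PySem.List.pyRange a b s = a :: PySem.List.pyRange (a + s) b s := by
  unfold PySem.List.pyRange
  simp only [show ¬ s = 0 by omega, if_false, show ¬ 0 < s by omega]
  have key : a - b + -s - 1 = (a - b - 1) + 1 * (-s) := by ring
  have hdiv : (a - b + -s - 1) / (-s) = (a - b - 1) / (-s) + 1 := by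
    rw [key, Int.add_mul_ediv_right _ _ (by omega : -s ≠ 0)]
  have hq0 : 0 ≤ (a - b - 1) / (-s) := Int.ediv_nonneg (by omega) (by omega)
  have hcount2 : (if b < a + s then ((a + s - b + -s - 1) / (-s)).toNat else 0)
      = ((a - b - 1) / (-s)).toNat := by
    split
    · congr 1; ring_nf
    · have : (a - b - 1) / (-s) = 0 := Int.ediv_eq_zero_of_lt (by omega) (by omega)
      omega
  rw [hcount2, if_pos h, hdiv]
  have : ((a - b - 1) / (-s) + 1).toNat = ((a - b - 1) / (-s)).toNat + 1 := by omega
  rw [this, List.range_succ_eq_map, List.map_cons, List.map_map]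
  congr 1
  · simp
  · apply List.map_congr_left
    intro k _
    simp [Function.comp]
    ring

theorem loopA_eq_pyRange (end_ step current : Int) (hs : step ≠ 0) :
    inRangeLoopA end_ step current = PySem.List.pyRange current end_ step := by
  fun_induction inRangeLoopA end_ step current with
  | case1 c h ih =>
    rw [ih]
    rcases h with ⟨h1, h2⟩ | ⟨h1, h2⟩
    · exact (pyRange_pos_cons c end_ step h1 h2).symm
    · exact (pyRange_neg_cons c end_ step h1 h2).symm
  | case2 c h =>
    rcases lt_or_gt_of_ne hs with hneg | hpos
    · exact (pyRange_neg_nil c end_ step hneg (by omega)).symm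
    · exact (pyRange_pos_nil c end_ step hpos (by omega)).symm

-- ===== VERDICT (by name: the statement is the Claim_ definition above) =====
theorem in_range_spec : Claim_equal_in_range := by
  intro start end_ step _ hpre
  unfold Spec_in_range in_range in_range_alt
  rw [if_neg hpre, if_neg hpre]
  exact loopA_eq_pyRange end_ step start hpre
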